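-- pv_equiv track=rewrite | github.com/LilianaHo/HomebrewEncryptor | decryptor.py | le_flip
-- ===== SOURCE A (Python) =====
-- def le_full_flip(binary):
--     encrypt_binary = ""
--     for i in range(len(binary)):
--         if binary[i] == "1":
--             encrypt_binary += "0"
--         else:
--             encrypt_binary += "1"
--     return encrypt_binary
--
-- def le_flip(binary, pass_val):
--     if pass_val == 0:
--         return le_full_flip(binary)
--     encrypt_binary = ""
--     for i in range(len(binary)):
--         if i % pass_val == 0:
--             if binary[i] == "1":
--                 encrypt_binary += "0"
--             else:
--                 encrypt_binary += "1"
--         else: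
--             encrypt_binary += binary[i]
--     return encrypt_binary
-- ===== SOURCE B (Python) =====
-- def le_flip(binary, pass_val):
--     if pass_val == 0:
--         return ''.join('0' if c == '1' else '1' for c in binary)
--     chars = list(binary)
--     for i in range(0, len(chars), abs(pass_val)):
--         chars[i] = '0' if chars[i] == '1' else '1'
--     return ''.join(chars)
-- ===== Notes on version B (the rewrite author's own statement) =====
-- stated objective: faster
-- what changed: Instead of scanning every index and testing i % pass_val == 0, B visits only the affected positions directly with a strided range(0, len, abs(pass_val)) and flips them in place in a char list (zero case is a single comprehension).
import Mathlib
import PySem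

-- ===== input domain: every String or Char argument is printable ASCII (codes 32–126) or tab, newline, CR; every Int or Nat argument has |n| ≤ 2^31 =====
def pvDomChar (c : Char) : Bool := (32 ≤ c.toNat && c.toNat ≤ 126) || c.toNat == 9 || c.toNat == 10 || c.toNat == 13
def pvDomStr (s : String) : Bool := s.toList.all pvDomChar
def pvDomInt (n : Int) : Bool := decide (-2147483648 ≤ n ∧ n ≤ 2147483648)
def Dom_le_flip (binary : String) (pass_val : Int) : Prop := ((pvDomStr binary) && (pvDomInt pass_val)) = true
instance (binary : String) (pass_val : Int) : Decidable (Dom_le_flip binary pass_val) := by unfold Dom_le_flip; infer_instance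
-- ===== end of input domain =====

-- B visits only the positions divisible by |pass_val| with a strided range and flips them
-- in place in a char list, instead of testing i % pass_val on every index (objective: faster by a constant factor).

-- ===== PORT A =====
def le_full_flip (binary : String) : String :=
  String.mk ((PySem.List.pyRange 0 (PySem.List.len binary.toList) 1).foldl
    (fun acc i => if PySem.List.pyGetD binary.toList i ' ' == '1' then acc ++ ['0'] else acc ++ ['1']) [])

def le_flip (binary : String) (pass_val : Int) : String :=
  if pass_val == 0 then le_full_flip binary
  else
    String.mk ((PySem.List.pyRange 0 (PySem.List.len binary.toList) 1).foldl
      (fun acc i =>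
        if PySem.Int.mod i pass_val == 0 then
          (if PySem.List.pyGetD binary.toList i ' ' == '1' then acc ++ ['0'] else acc ++ ['1'])
        else acc ++ [PySem.List.pyGetD binary.toList i ' ']) [])

-- ===== PORT B =====
def le_flip_alt (binary : String) (pass_val : Int) : String :=
  if pass_val == 0 then
    String.mk (binary.toList.map (fun c => if c == '1' then '0' else '1'))
  else
    String.mk ((PySem.List.pyRange 0 (PySem.List.len binary.toList) (pass_val.natAbs : Int)).foldl
      (fun cs i => PySem.List.pySetD cs i (if PySem.List.pyGetD cs i ' ' == '1' then '0' else '1')) binary.toList)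

-- ===== PRECONDITION & SPEC =====
def Spec_le_flip (binary : String) (pass_val : Int) (out : String) : Prop := out = le_flip_alt binary pass_val
instance (binary : String) (pass_val : Int) (out : String) : Decidable (Spec_le_flip binary pass_val out) := by unfold Spec_le_flip; infer_instance

-- ===== CLAIM (what is proved, stated in full; the proofs are below) =====
def Claim_equal_le_flip : Prop := ∀ (binary : String) (pass_val : Int), Dom_le_flip binary pass_val → Spec_le_flip binary pass_val (le_flip binary pass_val)

-- ===== LEMMAS AND PROOFS =====

def pvFlip (c : Char) : Char := if c == '1' then '0' else '1'

theorem pv_setfold_spec (is : List Int) (cs : List Char)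
    (hb : ∀ i ∈ is, 0 ≤ i ∧ i < (cs.length : Int)) (hnd : is.Nodup) :
    (is.foldl (fun cs i => PySem.List.pySetD cs i (if PySem.List.pyGetD cs i ' ' == '1' then '0' else '1')) cs).length = cs.length ∧
    ∀ j : Nat, PySem.List.pyGetD (is.foldl (fun cs i => PySem.List.pySetD cs i (if PySem.List.pyGetD cs i ' ' == '1' then '0' else '1')) cs) (j : Int) ' ' =
      if (j : Int) ∈ is then pvFlip (PySem.List.pyGetD cs (j : Int) ' ') else PySem.List.pyGetD cs (j : Int) ' ' := by
  induction is generalizing cs with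
  | nil => simp
  | cons i rest ih =>
    obtain ⟨hi0, hilt⟩ := hb i (by simp)
    have hi : i = ((i.toNat : Nat) : Int) := (Int.toNat_of_nonneg hi0).symm
    have hlt : i.toNat < cs.length := by omega
    set cs' := PySem.List.pySetD cs i (if PySem.List.pyGetD cs i ' ' == '1' then '0' else '1') with hcs'
    have hlen' : cs'.length = cs.length := PySem.List.length_pySetD cs i _
    have hget' : ∀ m : Nat, PySem.List.pyGetD cs' (m : Int) ' ' =
        if m = i.toNat then pvFlip (PySem.List.pyGetD cs (m : Int) ' ') else PySem.List.pyGetD cs (m : Int) ' ' := by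
      intro m
      rw [hcs', hi, PySem.List.pyGetD_pySetD_natCast cs i.toNat m _ ' ' hlt]
      simp only [Int.toNat_natCast]
      by_cases hm : m = i.toNat
      · rw [if_pos hm, if_pos hm, hm]; rfl
      · rw [if_neg hm, if_neg hm]
    have hb' : ∀ k ∈ rest, 0 ≤ k ∧ k < (cs'.length : Int) := by
      intro k hk; rw [hlen']; exact hb k (by simp [hk])
    obtain ⟨ihlen, ihget⟩ := ih cs' hb' hnd.of_cons
    constructor
    · rw [List.foldl_cons, ← hcs', ihlen, hlen']
    · intro j
      rw [List.foldl_cons, ← hcs', ihget j, hget' j]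
      have hine : i ∉ rest := (List.nodup_cons.mp hnd).1
      by_cases hjr : (j : Int) ∈ rest
      · have hne : j ≠ i.toNat := by
          intro h; subst h; rw [← hi] at hjr; exact hine hjr
        simp [hjr, hne, List.mem_cons]
      · by_cases hji : j = i.toNat
        · subst hji
          rw [← hi] at hjr ⊢
          simp [hjr, List.mem_cons]
        · have hji' : (j : Int) ≠ i := by rw [hi]; exact_mod_cast hji
          simp [hjr, hji, hji', List.mem_cons]

theorem pv_full_flip_eq (binary : String) :
    le_full_flip binary = String.mk (binary.toList.map (fun c => if c == '1' then '0' else '1')) := by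
  unfold le_full_flip
  have hbody : (fun (acc : List Char) (i : Int) =>
      if PySem.List.pyGetD binary.toList i ' ' == '1' then acc ++ ['0'] else acc ++ ['1'])
      = fun acc i => acc ++ [(fun c => if c == '1' then '0' else '1') (PySem.List.pyGetD binary.toList i ' ')] := by
    funext acc i; by_cases h : PySem.List.pyGetD binary.toList i ' ' == '1' <;> simp [h]
  simp only [hbody]
  rw [PySem.List.foldl_append_singleton_eq_map]
  rw [show (fun i => (fun c => if c == '1' then '0' else '1') (PySem.List.pyGetD binary.toList i ' '))
      = (fun c => if c == '1' then '0' else '1') ∘ (fun i => PySem.List.pyGetD binary.toList i ' ') from rfl,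
    ← List.map_map, PySem.List.map_pyGetD_pyRange_zero]
  simp

-- ===== VERDICT (by name: the statement is the Claim_ definition above) =====
theorem le_flip_spec : Claim_equal_le_flip := by
  intro binary pass_val _
  unfold Spec_le_flip le_flip le_flip_alt
  by_cases hp : pass_val = 0
  · simp [hp, pv_full_flip_eq]
  · have hpb : ¬ ((pass_val == 0) = true) := by simpa using hp
    rw [if_neg hpb, if_neg hpb]
    set bs := binary.toList with hbs
    set s : Int := (pass_val.natAbs : Int) with hs
    have hspos : 0 < s := by
      rw [hs]; exact_mod_cast Int.natAbs_pos.mpr hp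
    have hnd : (PySem.List.pyRange 0 (PySem.List.len bs) s).Nodup := by
      rw [PySem.List.pyRange_of_pos _ _ hspos]
      refine List.Nodup.map ?_ (List.nodup_range)
      intro a b hab
      have h2 : s * (a : Int) = s * (b : Int) := by simpa using hab
      exact_mod_cast mul_left_cancel₀ (by omega : s ≠ 0) h2
    have hbnd : ∀ i ∈ PySem.List.pyRange 0 (PySem.List.len bs) s, 0 ≤ i ∧ i < (bs.length : Int) := by
      intro i hi
      rw [PySem.List.mem_pyRange_iff_of_pos hspos] at hi
      simpa [PySem.List.len_eq] using ⟨hi.1, hi.2.1⟩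
    obtain ⟨hlenB, hgetB⟩ := pv_setfold_spec (PySem.List.pyRange 0 (PySem.List.len bs) s) bs hbnd hnd
    -- A-side: the foldl is a map over the range
    have hbody : (fun (acc : List Char) (i : Int) =>
        if PySem.Int.mod i pass_val == 0 then
          (if PySem.List.pyGetD bs i ' ' == '1' then acc ++ ['0'] else acc ++ ['1'])
        else acc ++ [PySem.List.pyGetD bs i ' '])
        = fun acc i => acc ++ [if PySem.Int.mod i pass_val == 0 then pvFlip (PySem.List.pyGetD bs i ' ') else PySem.List.pyGetD bs i ' '] := by
      funext acc i
      by_cases h1 : PySem.Int.mod i pass_val == 0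
      · by_cases h2 : PySem.List.pyGetD bs i ' ' == '1' <;> simp [h1, h2, pvFlip]
      · simp [h1]
    simp only [hbody, PySem.List.foldl_append_singleton_eq_map, List.nil_append]
    -- now prove the two lists are equal
    congr 1
    apply List.ext_getElem
    · rw [List.length_map, PySem.List.length_pyRange_one, hlenB]
      simp [PySem.List.len_eq]
    · intro k h1 h2
      have hk : k < bs.length := by
        simpa [PySem.List.len_eq, PySem.List.length_pyRange_one] using h1
      have hA : (List.map (fun i => if PySem.Int.mod i pass_val == 0 then pvFlip (PySem.List.pyGetD bs i ' ') else PySem.List.pyGetD bs i ' ') (PySem.List.pyRange 0 (PySem.List.len bs) 1))[k] =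
          if PySem.Int.mod (k : Int) pass_val == 0 then pvFlip (PySem.List.pyGetD bs (k : Int) ' ') else PySem.List.pyGetD bs (k : Int) ' ' := by
        simp [PySem.List.getElem_pyRange_one]
      have hgk := hgetB k
      have hmem : ((k : Int) ∈ PySem.List.pyRange 0 (PySem.List.len bs) s) ↔ (PySem.Int.mod (k : Int) pass_val == 0) = true := by
        rw [PySem.List.mem_pyRange_iff_of_pos hspos]
        rw [beq_iff_eq, PySem.Int.mod_eq_zero_iff_dvd]
        constructor
        · rintro ⟨-, -, hd⟩
          rw [Int.sub_zero] at hd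
          rw [hs] at hd
          exact Int.natAbs_dvd.mp hd
        · intro hd
          refine ⟨by positivity, by simpa [PySem.List.len_eq] using (by exact_mod_cast hk : (k : Int) < (bs.length : Int)), ?_⟩
          rw [Int.sub_zero, hs]
          exact Int.natAbs_dvd.mpr hd
      have hgetEq : ∀ (L : List Char) (h : k < L.length), L[k] = PySem.List.pyGetD L (k : Int) ' ' := by
        intro L h; rw [PySem.List.pyGetD_natCast]; simp [h]
      rw [hA, hgetEq _ h2, hgk]
      by_cases hm : (k : Int) ∈ PySem.List.pyRange 0 (PySem.List.len bs) s
      · rw [if_pos hm, if_pos (hmem.mp hm)]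
      · rw [if_neg hm, if_neg (fun h => hm (hmem.mpr h))]
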